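-- pv_equiv track=rewrite | github.com/qnert/Python_Django_Piscine | ex05/all_in.py | display_state
-- ===== SOURCE A (Python) =====
-- def display_state(city: str) -> str:
--   states = {
--         "Oregon": "OR",
--         "Alabama": "AL",
--         "New Jersey": "NJ",
--         "Colorado": "CO"
--     }
--   capital_cities = {
--         "OR": "Salem",
--         "AL": "Montgomery",
--         "NJ": "Trenton",
--         "CO": "Denver"
--     }
--   key_city = [key for key, value in capital_cities.items() if value == city]
--   if key_city:
--     key_state = [key for key, value in states.items() if value == key_city[0]]
--     if key_state:
--       return(f"{city} is the capital of {key_state[0]}")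
--   else:
--     return("")
-- ===== SOURCE B (Python) =====
-- CAPITAL_TO_STATE = {
--     "Salem": "Oregon",
--     "Montgomery": "Alabama",
--     "Trenton": "New Jersey",
--     "Denver": "Colorado",
-- }
--
-- def display_state(city: str) -> str:
--   state = CAPITAL_TO_STATE.get(city)
--   if state is None:
--     return ""
--   return f"{city} is the capital of {state}"
-- ===== Notes on version B (the rewrite author's own statement) =====
-- stated objective: simpler
-- what changed: Replaces the two reverse-scan comprehensions over the state and capital dicts and nested conditionals with one direct capital-to-state dict and a single lookup.
import Mathlib
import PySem

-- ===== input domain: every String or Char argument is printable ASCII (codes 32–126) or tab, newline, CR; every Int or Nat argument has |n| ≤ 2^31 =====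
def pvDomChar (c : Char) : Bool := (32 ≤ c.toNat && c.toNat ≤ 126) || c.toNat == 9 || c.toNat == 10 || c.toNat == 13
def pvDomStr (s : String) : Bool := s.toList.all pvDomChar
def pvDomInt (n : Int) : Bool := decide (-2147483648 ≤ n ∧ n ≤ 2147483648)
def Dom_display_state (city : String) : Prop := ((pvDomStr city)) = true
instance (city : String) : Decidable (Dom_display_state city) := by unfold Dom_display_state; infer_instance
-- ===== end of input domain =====

-- B replaces the two reverse-scan comprehensions and nested conditionals of A with one
-- direct capital→state dict and a single lookup (simpler; return value identical everywhere).

-- ===== PORT A =====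
def display_state (city : String) : Option String :=
  let states : PySem.Dict String String := PySem.Dict.ofList
    [("Oregon", "OR"), ("Alabama", "AL"), ("New Jersey", "NJ"), ("Colorado", "CO")]
  let capital_cities : PySem.Dict String String := PySem.Dict.ofList
    [("OR", "Salem"), ("AL", "Montgomery"), ("NJ", "Trenton"), ("CO", "Denver")]
  let key_city := ((PySem.Dict.items capital_cities).filter (fun kv => kv.2 == city)).map Prod.fst
  match key_city with
  | [] => some ""
  | k0 :: _ =>
    let key_state := ((PySem.Dict.items states).filter (fun kv => kv.2 == k0)).map Prod.fst
    match key_state with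
    | [] => none  -- Python falls off the function: returns None
    | s0 :: _ => some (city ++ " is the capital of " ++ s0)

-- ===== PORT B =====
def capitalToState : PySem.Dict String String := PySem.Dict.ofList
  [("Salem", "Oregon"), ("Montgomery", "Alabama"), ("Trenton", "New Jersey"), ("Denver", "Colorado")]

def display_state_alt (city : String) : Option String :=
  match PySem.Dict.get? capitalToState city with
  | none => some ""
  | some st => some (city ++ " is the capital of " ++ st)

-- ===== PRECONDITION & SPEC =====
def Spec_display_state (city : String) (out : Option String) : Prop := out = display_state_alt city
instance (city : String) (out : Option String) : Decidable (Spec_display_state city out) := by unfold Spec_display_state; infer_instance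

-- ===== CLAIM (what is proved, stated in full; the proofs are below) =====
def Claim_equal_display_state : Prop := ∀ (city : String), Dom_display_state city → Spec_display_state city (display_state city)

-- ===== LEMMAS AND PROOFS =====

-- ===== VERDICT (by name: the statement is the Claim_ definition above) =====
theorem display_state_spec : Claim_equal_display_state := by
  intro city _
  unfold Spec_display_state display_state display_state_alt capitalToState
  by_cases h1 : city = "Salem"
  · subst h1; decide
  by_cases h2 : city = "Montgomery"
  · subst h2; decide
  by_cases h3 : city = "Trenton"
  · subst h3; decide
  by_cases h4 : city = "Denver"
  · subst h4; decide
  have e1 : ("Salem" == city) = false := beq_false_of_ne (Ne.symm h1)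
  have e2 : ("Montgomery" == city) = false := beq_false_of_ne (Ne.symm h2)
  have e3 : ("Trenton" == city) = false := beq_false_of_ne (Ne.symm h3)
  have e4 : ("Denver" == city) = false := beq_false_of_ne (Ne.symm h4)
  have f1 : (city == "Salem") = false := beq_false_of_ne h1
  have f2 : (city == "Montgomery") = false := beq_false_of_ne h2
  have f3 : (city == "Trenton") = false := beq_false_of_ne h3
  have f4 : (city == "Denver") = false := beq_false_of_ne h4
  simp [PySem.Dict.ofList, PySem.Dict.update, PySem.Dict.insert, PySem.Dict.empty,
        PySem.Dict.items, PySem.Dict.get?, List.filter, List.find?,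
        e1, e2, e3, e4, f1, f2, f3, f4]
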